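-- pv_equiv track=rewrite | github.com/ayland/InGame | WebScrapping.py | gen_requisitos
-- ===== SOURCE A (Python) =====
-- def gen_requisitos(gameurl):
--     i = 0
--     for k in range(len(gameurl)):
--         if gameurl[k] == '/':
--             i = i + 1
--             if(i == 3):
--                 req = gameurl[:k] + '/juegos/requisitos' + gameurl[k:]
--                 return req
-- ===== SOURCE B (Python) =====
-- def gen_requisitos(gameurl):
--     parts = gameurl.split('/', 3)
--     if len(parts) < 4:
--         return None
--     return '/'.join(parts[:3]) + '/juegos/requisitos/' + parts[3]
-- ===== Notes on version B (the rewrite author's own statement) =====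
-- stated objective: faster
-- what changed: Replaces the character-by-character index scan for the third '/' with split('/', 3) on the URL and a rejoin of the first three segments plus the inserted path; the constant-factor win is that the splitting runs in the C string routine instead of a per-character Python loop.
import Mathlib
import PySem

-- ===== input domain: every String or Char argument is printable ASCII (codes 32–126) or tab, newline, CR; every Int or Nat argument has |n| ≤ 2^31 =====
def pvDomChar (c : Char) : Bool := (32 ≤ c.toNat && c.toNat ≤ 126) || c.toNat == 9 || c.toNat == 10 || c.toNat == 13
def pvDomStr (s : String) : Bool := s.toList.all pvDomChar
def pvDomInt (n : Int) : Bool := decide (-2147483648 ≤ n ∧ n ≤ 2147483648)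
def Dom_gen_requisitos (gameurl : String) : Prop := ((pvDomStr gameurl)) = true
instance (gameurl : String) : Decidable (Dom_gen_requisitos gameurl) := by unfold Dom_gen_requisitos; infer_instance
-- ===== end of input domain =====

-- B replaces A's character-by-character scan for the third '/' by split('/', 3) and a rejoin (timed measurably faster by the check).

-- ===== PORT A =====
-- the 'for k in range(len(gameurl))' loop with the slash counter i; returns early at the third slash
def genReqGo (s : List Char) (k : Nat) (i : Nat) : Option String :=
  if h : k < s.length then
    if s[k] = '/' then
      if i + 1 = 3 then
        some (String.ofList (s.take k ++ "/juegos/requisitos".toList ++ s.drop k))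
      else genReqGo s (k + 1) (i + 1)
    else genReqGo s (k + 1) i
  else none
termination_by s.length - k

def gen_requisitos (gameurl : String) : Option String := genReqGo gameurl.toList 0 0

-- ===== PORT B =====
def gen_requisitos_alt (gameurl : String) : Option String :=
  -- parts = gameurl.split('/', 3); the separator "/" is non-empty, so splitMax? is always `some`
  let parts := (PySem.Chars.splitMax? gameurl.toList "/".toList 3).getD []
  if parts.length < 4 then none
  else some (String.ofList (PySem.Chars.join "/".toList (parts.take 3)
              ++ "/juegos/requisitos/".toList ++ PySem.List.pyGetD parts 3 []))

-- ===== PRECONDITION & SPEC =====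
def Spec_gen_requisitos (gameurl : String) (out : Option String) : Prop := out = gen_requisitos_alt gameurl
instance (gameurl : String) (out : Option String) : Decidable (Spec_gen_requisitos gameurl out) := by unfold Spec_gen_requisitos; infer_instance

-- ===== CLAIM (what is proved, stated in full; the proofs are below) =====
def Claim_equal_gen_requisitos : Prop := ∀ (gameurl : String), Dom_gen_requisitos gameurl → Spec_gen_requisitos gameurl (gen_requisitos gameurl)

-- ===== LEMMAS AND PROOFS =====

-- split a char list at its first '/' (proof-side characterization shared by both ports)
def cutSlash : List Char → Option (List Char × List Char)
  | [] => none
  | c :: r => if c = '/' then some ([], r) else (cutSlash r).map (fun pq => (c :: pq.1, pq.2))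

-- the inserted literal, split form
theorem ins_lit : ("/juegos/requisitos/".toList : List Char) = "/juegos/requisitos".toList ++ ['/'] := by decide

theorem cutSlash_some {l p q : List Char} (h : cutSlash l = some (p, q)) :
    l = p ++ '/' :: q := by
  induction l generalizing p with
  | nil => simp [cutSlash] at h
  | cons c r ih =>
    rw [cutSlash] at h
    by_cases hc : c = '/'
    · rw [if_pos hc] at h
      simp at h
      simp [hc, ← h.1, ← h.2]
    · rw [if_neg hc] at h
      rcases hcut : cutSlash r with _ | ⟨p', q'⟩ <;> rw [hcut] at h
      · simp at h
      · simp at h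
        obtain ⟨hp, hq⟩ := h
        subst hq
        simp [← hp, ih hcut]

theorem take_app (p q : List Char) (c : Char) : (p ++ c :: q).take p.length = p := by
  simp

theorem drop_app (p q : List Char) (c : Char) : (p ++ c :: q).drop (p.length + 1) = q := by
  induction p with
  | nil => simp
  | cons a p ih => simp [ih]

theorem genReqGo_none (s : List Char) (k i : Nat) (h : cutSlash (s.drop k) = none) :
    genReqGo s k i = none := by
  fun_induction genReqGo s k i with
  | case1 k i hk hsl hi =>
    rw [List.drop_eq_getElem_cons hk, hsl] at h
    simp [cutSlash] at h
  | case2 k i hk hsl hi ih =>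
    rw [List.drop_eq_getElem_cons hk, hsl] at h
    simp [cutSlash] at h
  | case3 k i hk hsl ih =>
    apply ih
    rw [List.drop_eq_getElem_cons hk, cutSlash, if_neg hsl] at h
    simp at h
    exact h
  | case4 k i hk => rfl

theorem genReqGo_step (s : List Char) (k i : Nat) (p q : List Char)
    (h : cutSlash (s.drop k) = some (p, q)) :
    genReqGo s k i =
      if i = 2 then
        some (String.ofList (s.take (k + p.length) ++ "/juegos/requisitos".toList
              ++ s.drop (k + p.length)))
      else genReqGo s (k + p.length + 1) (i + 1) := by
  induction p generalizing k with
  | nil =>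
    have hlen : k < s.length := by
      by_contra hk
      rw [List.drop_eq_nil_of_le (by omega)] at h
      simp [cutSlash] at h
    rw [List.drop_eq_getElem_cons hlen, cutSlash] at h
    by_cases hsl : s[k] = '/'
    · rw [genReqGo]
      simp only [hlen, dif_pos, hsl, if_pos]
      by_cases hi : i = 2
      · simp [hi]
      · have hne3 : ¬ (i + 1 = 3) := by omega
        simp [hi, hne3]
    · rw [if_neg hsl] at h
      cases hcut : cutSlash (s.drop (k + 1)) with
      | none => rw [hcut] at h; simp at h
      | some pq => rw [hcut] at h; simp at h
  | cons c p' ih =>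
    have hlen : k < s.length := by
      by_contra hk
      rw [List.drop_eq_nil_of_le (by omega)] at h
      simp [cutSlash] at h
    rw [List.drop_eq_getElem_cons hlen, cutSlash] at h
    have hne : ¬ (s[k] = '/') := by
      intro hsl
      rw [if_pos hsl] at h
      simp at h
    rw [if_neg hne] at h
    cases hcut : cutSlash (s.drop (k + 1)) with
    | none => rw [hcut] at h; simp at h
    | some pq =>
      obtain ⟨pp, qq⟩ := pq
      rw [hcut] at h
      simp at h
      obtain ⟨⟨hc, hp⟩, hq⟩ := h
      rw [hp, hq] at hcut
      rw [genReqGo]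
      simp only [hlen, dif_pos, hne]
      rw [ih (k + 1) hcut]
      simp only [if_false]
      have h2 : k + (p'.length + 1) = k + 1 + p'.length := by omega
      simp [h2]

-- B-side: the reachable shapes of splitOnMax.go for the single-char separator "/"
theorem go_m0 (fuel : Nat) (l cur : List Char) (acc : List (List Char)) :
    PySem.Chars.splitOnMax.go "/".toList fuel 0 l cur acc
      = ((cur.reverse ++ l) :: acc).reverse := by
  cases fuel with
  | zero => rfl
  | succ fuel =>
    cases l with
    | nil => simp [PySem.Chars.splitOnMax.go]
    | cons c r => simp [PySem.Chars.splitOnMax.go]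

theorem go_nocut (fuel : Nat) (m : Nat) (l cur : List Char) (acc : List (List Char))
    (hf : l.length < fuel) (hm : 0 < m) (h : cutSlash l = none) :
    PySem.Chars.splitOnMax.go "/".toList fuel m l cur acc
      = ((cur.reverse ++ l) :: acc).reverse := by
  induction fuel generalizing l cur with
  | zero => omega
  | succ fuel ih =>
    cases l with
    | nil => simp [PySem.Chars.splitOnMax.go]
    | cons c r =>
      have hc : ¬ (c = '/') := by
        intro hc
        rw [cutSlash, if_pos hc] at h
        simp at h
      have hr : cutSlash r = none := by
        rw [cutSlash, if_neg hc] at h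
        cases hcut : cutSlash r with
        | none => rfl
        | some pq => rw [hcut] at h; simp at h
      have hpre : List.isPrefixOf "/".toList (c :: r) = false := by
        simp [List.isPrefixOf]
        exact fun hh => hc (Eq.symm hh)
      rw [PySem.Chars.splitOnMax.go, if_neg hm.ne', hpre]
      simp only [Bool.false_eq_true, if_false]
      rw [ih r (c :: cur) (by simp only [List.length_cons] at hf; omega) hr]
      simp

theorem go_cut (fuel : Nat) (m : Nat) (l cur : List Char) (acc : List (List Char))
    (p q : List Char) (hf : l.length < fuel) (hm : 0 < m) (h : cutSlash l = some (p, q)) :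
    PySem.Chars.splitOnMax.go "/".toList fuel m l cur acc
      = PySem.Chars.splitOnMax.go "/".toList (fuel - (p.length + 1)) (m - 1) q []
          ((cur.reverse ++ p) :: acc) := by
  induction fuel generalizing l cur p with
  | zero => omega
  | succ fuel ih =>
    cases l with
    | nil => simp [cutSlash] at h
    | cons c r =>
      by_cases hc : c = '/'
      · subst hc
        rw [cutSlash, if_pos rfl] at h
        simp at h
        obtain ⟨hp, hq⟩ := h
        subst hp
        subst hq
        rw [PySem.Chars.splitOnMax.go, if_neg hm.ne']
        simp [List.isPrefixOf]
      · have hpre : List.isPrefixOf "/".toList (c :: r) = false := by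
          simp [List.isPrefixOf]
          exact fun hh => hc (Eq.symm hh)
        rw [cutSlash, if_neg hc] at h
        cases hcut : cutSlash r with
        | none => rw [hcut] at h; simp at h
        | some pq =>
          obtain ⟨pp, qq⟩ := pq
          rw [hcut] at h
          simp at h
          obtain ⟨hp, hq⟩ := h
          rw [hq] at hcut
          rw [PySem.Chars.splitOnMax.go, if_neg hm.ne', hpre]
          simp only [Bool.false_eq_true, if_false]
          rw [ih r (c :: cur) pp (by simp only [List.length_cons] at hf; omega) hcut]
          rw [← hp]
          simp only [List.length_cons, List.reverse_cons, List.append_assoc,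
            List.cons_append, List.nil_append]
          rw [show fuel + 1 - (pp.length + 1 + 1) = fuel - (pp.length + 1) from by omega]

-- ===== VERDICT (by name: the statement is the Claim_ definition above) =====
theorem gen_requisitos_spec : Claim_equal_gen_requisitos := by
  intro gameurl _
  unfold Spec_gen_requisitos gen_requisitos gen_requisitos_alt
  rw [PySem.Chars.splitMax?,
      if_neg (show ¬(("/".toList : List Char).isEmpty = true) by decide)]
  simp only [Option.getD_some]
  rw [PySem.Chars.splitOnMax, if_neg (show ¬((3:ℤ) < 0) by decide),
      show ((3:ℤ).toNat) = 3 from rfl]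
  have hsep : ("/".toList : List Char) = ['/'] := by decide
  generalize gameurl.toList = s
  rcases h1 : cutSlash s with _ | ⟨p1, q1⟩
  · -- no slash at all: both None
    rw [go_nocut _ 3 _ _ _ (by omega) (by omega) h1,
        genReqGo_none s 0 0 (by simpa using h1)]
    simp
  · have e1 := cutSlash_some h1
    have l1 : s.length = p1.length + 1 + q1.length := by simp [e1]; omega
    rw [go_cut _ 3 _ _ _ p1 q1 (by omega) (by omega) h1]
    have hA1 : genReqGo s 0 0 = genReqGo s (p1.length + 1) 1 := by
      rw [genReqGo_step s 0 0 p1 q1 (by simpa using h1)]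
      simp
    have hd1 : s.drop (p1.length + 1) = q1 := by rw [e1, drop_app]
    rcases h2 : cutSlash q1 with _ | ⟨p2, q2⟩
    · -- exactly one slash: both None
      rw [go_nocut _ 2 _ _ _ (by omega) (by omega) h2,
          hA1, genReqGo_none s _ 1 (by rw [hd1]; exact h2)]
      simp
    · have e2 := cutSlash_some h2
      have l2 : q1.length = p2.length + 1 + q2.length := by simp [e2]; omega
      rw [go_cut _ 2 _ _ _ p2 q2 (by omega) (by omega) h2]
      have hA2 : genReqGo s (p1.length + 1) 1 = genReqGo s (p1.length + 1 + p2.length + 1) 2 := by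
        rw [genReqGo_step s _ 1 p2 q2 (by rw [hd1]; exact h2)]
        simp
      have hd2 : s.drop (p1.length + 1 + p2.length + 1) = q2 := by
        rw [show p1.length + 1 + p2.length + 1 = p1.length + 1 + (p2.length + 1) by omega,
            ← List.drop_drop, hd1, e2, drop_app]
      rcases h3 : cutSlash q2 with _ | ⟨p3, q3⟩
      · -- exactly two slashes: both None
        rw [go_nocut _ 1 _ _ _ (by omega) (by omega) h3,
            hA1, hA2, genReqGo_none s _ 2 (by rw [hd2]; exact h3)]
        simp
      · -- three or more slashes: both insert before the third one
        have e3 := cutSlash_some h3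
        rw [go_cut _ 1 _ _ _ p3 q3 (by omega) (by omega) h3, go_m0]
        rw [hA1, hA2, genReqGo_step s _ 2 p3 q3 (by rw [hd2]; exact h3)]
        have hk3 : p1.length + 1 + p2.length + 1 + p3.length
            = (p1 ++ '/' :: (p2 ++ '/' :: p3)).length := by simp; omega
        have hsplit : s = (p1 ++ '/' :: (p2 ++ '/' :: p3)) ++ '/' :: q3 := by
          rw [e1, e2, e3]; simp
        have htk : s.take (p1.length + 1 + p2.length + 1 + p3.length)
            = p1 ++ '/' :: (p2 ++ '/' :: p3) := by
          rw [hsplit, hk3, take_app]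
        have hdr : s.drop (p1.length + 1 + p2.length + 1 + p3.length)
            = '/' :: q3 := by
          rw [hsplit, hk3, List.drop_left]
        rw [htk, hdr]
        have hparts : ((([] : List Char).reverse ++ q3) ::
              (([] : List Char).reverse ++ p3) ::
                (([] : List Char).reverse ++ p2) ::
                  (([] : List Char).reverse ++ p1) :: ([] : List (List Char))).reverse
            = [p1, p2, p3, q3] := by simp
        rw [hparts, if_neg (show ¬(([p1, p2, p3, q3] : List (List Char)).length < 4) by simp)]
        have hjoin : PySem.Chars.join "/".toList ([p1, p2, p3, q3].take 3)
            = p1 ++ '/' :: (p2 ++ '/' :: p3) := by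
          simp [PySem.Chars.join, hsep, List.intercalate]
        have hget : PySem.List.pyGetD ([p1, p2, p3, q3] : List (List Char)) 3 [] = q3 := by
          simp [PySem.List.pyGetD, PySem.List.pyGet?, PySem.List.pyIdx?]
        rw [hjoin, hget, ins_lit]
        simp
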